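-- pv_equiv track=rewrite | github.com/Micronaet/micronaet-industria40 | industria40_robot/model/robot_mrp_fabric.py | extract_fabric_part
-- ===== SOURCE A (Python) =====
-- def extract_fabric_part(fabric_code):
--     """ Extract part of code
--     """
--     # fabric = fabric_code[:6]
--     # layer_fabric = fabric[:3]  # first char
--     # color_part = fabric_code[6:]
--     fabric = layer_fabric = color_part = ''
--     change = 1
--     for c in fabric_code:
--         # Step 1
--         if change == 1 and c.isalpha():
--             fabric += c
--             layer_fabric += c
--             continue
--
--         # Step 2
--         if c.isdigit():  # Change digit
--             if change == 1:  # When passed to step 2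
--                 change = 2
--             if change == 2:
--                 fabric += c
--             else:  # Number in part 3
--                 color_part += c
--             continue
--
--         # Step 3 (return char)
--         else:
--             change = 3  # Last part
--             color_part += c
--     return fabric, layer_fabric, color_part
-- ===== SOURCE B (Python) =====
-- def extract_fabric_part(fabric_code):
--     """ Extract part of code
--     """
--     i = 0
--     while i < len(fabric_code) and fabric_code[i].isalpha():
--         i += 1
--     j = i
--     while j < len(fabric_code) and fabric_code[j].isdigit():
--         j += 1
--     return fabric_code[:j], fabric_code[:i], fabric_code[j:]
-- ===== Notes on version B (the rewrite author's own statement) =====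
-- stated objective: simpler
-- what changed: Replaces the single-pass state machine with a change-flag by two boundary scans (end of the leading alphabetic run, end of the following digit run) and three slices.
import Mathlib
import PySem

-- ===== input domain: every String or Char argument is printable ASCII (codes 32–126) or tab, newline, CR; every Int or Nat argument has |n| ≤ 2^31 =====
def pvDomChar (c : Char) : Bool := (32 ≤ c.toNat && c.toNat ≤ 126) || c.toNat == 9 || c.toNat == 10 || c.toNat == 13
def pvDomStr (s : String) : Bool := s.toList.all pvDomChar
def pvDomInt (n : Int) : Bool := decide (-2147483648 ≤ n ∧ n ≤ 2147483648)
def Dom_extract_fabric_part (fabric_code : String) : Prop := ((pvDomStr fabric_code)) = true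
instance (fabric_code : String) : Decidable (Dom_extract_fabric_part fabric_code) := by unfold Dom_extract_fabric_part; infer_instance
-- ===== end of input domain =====

-- B replaces A's one-pass state machine (change flag 1/2/3) by two boundary scans
-- (end of the leading alphabetic run, end of the following digit run) and three
-- slices; same O(n) cost, simpler shape.

-- ===== PORT A =====
-- one loop iteration of A: state (fabric, layer_fabric, color_part, change)
def pvStepA (st : List Char × List Char × List Char × Int) (c : Char) :
    List Char × List Char × List Char × Int :=
  let (fabric, layer_fabric, color_part, change) := st
  -- Step 1
  if change == 1 && PySem.Chars.isalpha c then
    (fabric ++ [c], layer_fabric ++ [c], color_part, change)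
  -- Step 2
  else if PySem.Chars.isdigit c then
    let change := if change == 1 then 2 else change
    if change == 2 then (fabric ++ [c], layer_fabric, color_part, change)
    else (fabric, layer_fabric, color_part ++ [c], change)
  -- Step 3
  else
    (fabric, layer_fabric, color_part ++ [c], 3)

def extract_fabric_part (fabric_code : String) : String × String × String :=
  let st := fabric_code.toList.foldl pvStepA ([], [], [], 1)
  (String.ofList st.1, String.ofList st.2.1, String.ofList st.2.2.1)

-- ===== PORT B =====
-- length of the run of characters satisfying p at the front (B's while-loop index scan)
def pvRunLen (p : Char → Bool) : List Char → Nat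
  | [] => 0
  | c :: cs => if p c then pvRunLen p cs + 1 else 0

def extract_fabric_part_alt (fabric_code : String) : String × String × String :=
  let cs := fabric_code.toList
  let i := pvRunLen PySem.Chars.isalpha cs
  let j := i + pvRunLen PySem.Chars.isdigit (cs.drop i)
  (String.ofList (cs.take j), String.ofList (cs.take i), String.ofList (cs.drop j))

-- ===== PRECONDITION & SPEC =====
def Spec_extract_fabric_part (fabric_code : String) (out : String × String × String) : Prop := out = extract_fabric_part_alt fabric_code
instance (fabric_code : String) (out : String × String × String) : Decidable (Spec_extract_fabric_part fabric_code out) := by unfold Spec_extract_fabric_part; infer_instance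

-- ===== CLAIM (what is proved, stated in full; the proofs are below) =====
def Claim_equal_extract_fabric_part : Prop := ∀ (fabric_code : String), Dom_extract_fabric_part fabric_code → Spec_extract_fabric_part fabric_code (extract_fabric_part fabric_code)

-- ===== LEMMAS AND PROOFS =====

lemma pvRunLen_eq (p : Char → Bool) (cs : List Char) :
    pvRunLen p cs = (cs.takeWhile p).length := by
  induction cs with
  | nil => rfl
  | cons c cs ih => by_cases h : p c <;> simp [pvRunLen, List.takeWhile, h, ih]

lemma pv_take_takeWhile (p : Char → Bool) (r : List Char) :
    r.take (r.takeWhile p).length = r.takeWhile p := by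
  induction r with
  | nil => rfl
  | cons c cs ih => by_cases h : p c <;> simp [List.takeWhile, h, ih]

lemma pv_drop_takeWhile (p : Char → Bool) (r : List Char) :
    r.drop (r.takeWhile p).length = r.dropWhile p := by
  induction r with
  | nil => rfl
  | cons c cs ih => by_cases h : p c <;> simp [List.takeWhile, List.dropWhile, h, ih]

-- in state change = 3 everything goes to color_part
lemma pv_loop3 (cs : List Char) (f l col : List Char) :
    cs.foldl pvStepA (f, l, col, 3) = (f, l, col ++ cs, 3) := by
  induction cs generalizing col with
  | nil => simp
  | cons c cs ih =>
      have hstep : pvStepA (f, l, col, 3) c = (f, l, col ++ [c], 3) := by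
        by_cases h : PySem.Chars.isdigit c <;> simp [pvStepA, h]
      simp [hstep, ih]

-- in state change = 2 the digit run extends fabric, the rest goes to color_part
lemma pv_loop2 (cs : List Char) (f l col : List Char) :
    cs.foldl pvStepA (f, l, col, 2) =
      (f ++ cs.takeWhile PySem.Chars.isdigit, l,
       col ++ cs.dropWhile PySem.Chars.isdigit,
       if cs.dropWhile PySem.Chars.isdigit = [] then (2 : Int) else 3) := by
  induction cs generalizing f col with
  | nil => simp
  | cons c cs ih =>
      by_cases hd : PySem.Chars.isdigit c
      · have hstep : pvStepA (f, l, col, 2) c = (f ++ [c], l, col, 2) := by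
          simp [pvStepA, hd]
        simp [hstep, ih, hd]
      · have hstep : pvStepA (f, l, col, 2) c = (f, l, col ++ [c], 3) := by
          simp [pvStepA, hd]
        simp [hstep, pv_loop3, hd]

-- in state change = 1 the fold realises A's full three-phase behaviour
lemma pv_loop1 (cs : List Char) (f l col : List Char) :
    cs.foldl pvStepA (f, l, col, 1) =
      (f ++ cs.takeWhile PySem.Chars.isalpha
         ++ (cs.dropWhile PySem.Chars.isalpha).takeWhile PySem.Chars.isdigit,
       l ++ cs.takeWhile PySem.Chars.isalpha,
       col ++ (cs.dropWhile PySem.Chars.isalpha).dropWhile PySem.Chars.isdigit,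
       if cs.dropWhile PySem.Chars.isalpha = [] then (1 : Int)
       else if (cs.dropWhile PySem.Chars.isalpha).dropWhile PySem.Chars.isdigit = [] then 2
       else 3) := by
  induction cs generalizing f l col with
  | nil => simp
  | cons c cs ih =>
      by_cases ha : PySem.Chars.isalpha c
      · have hstep : pvStepA (f, l, col, 1) c = (f ++ [c], l ++ [c], col, 1) := by
          simp [pvStepA, ha]
        simp [hstep, ih, ha]
      · by_cases hd : PySem.Chars.isdigit c
        · have hstep : pvStepA (f, l, col, 1) c = (f ++ [c], l, col, 2) := by
            simp [pvStepA, ha, hd]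
          simp [hstep, pv_loop2, ha, hd]
        · have hstep : pvStepA (f, l, col, 1) c = (f, l, col ++ [c], 3) := by
            simp [pvStepA, ha, hd]
          simp [hstep, pv_loop3, ha, hd]

-- B's take/drop at the second boundary equal A's run pieces
lemma pv_take_j (cs : List Char) :
    cs.take ((cs.takeWhile PySem.Chars.isalpha).length
        + ((cs.dropWhile PySem.Chars.isalpha).takeWhile PySem.Chars.isdigit).length)
      = cs.takeWhile PySem.Chars.isalpha
        ++ (cs.dropWhile PySem.Chars.isalpha).takeWhile PySem.Chars.isdigit := by
  have h := List.take_length_add_append (l₁ := cs.takeWhile PySem.Chars.isalpha)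
      (l₂ := cs.dropWhile PySem.Chars.isalpha)
      (i := ((cs.dropWhile PySem.Chars.isalpha).takeWhile PySem.Chars.isdigit).length)
  rw [List.takeWhile_append_dropWhile] at h
  rw [h, pv_take_takeWhile]

lemma pv_drop_j (cs : List Char) :
    cs.drop ((cs.takeWhile PySem.Chars.isalpha).length
        + ((cs.dropWhile PySem.Chars.isalpha).takeWhile PySem.Chars.isdigit).length)
      = (cs.dropWhile PySem.Chars.isalpha).dropWhile PySem.Chars.isdigit := by
  have h := List.drop_length_add_append (l₁ := cs.takeWhile PySem.Chars.isalpha)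
      (l₂ := cs.dropWhile PySem.Chars.isalpha)
      (i := ((cs.dropWhile PySem.Chars.isalpha).takeWhile PySem.Chars.isdigit).length)
  rw [List.takeWhile_append_dropWhile] at h
  rw [h, pv_drop_takeWhile]

-- ===== VERDICT (by name: the statement is the Claim_ definition above) =====
theorem extract_fabric_part_spec : Claim_equal_extract_fabric_part := by
  intro s _
  unfold Spec_extract_fabric_part extract_fabric_part extract_fabric_part_alt
  simp only [pv_loop1, pvRunLen_eq, pv_drop_takeWhile,List.nil_append,
    pv_take_j, pv_drop_j, pv_take_takeWhile]
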